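-- pv_equiv track=rewrite | github.com/yqsy/vim | tools/openwin.py | win32_escape
-- ===== SOURCE A (Python) =====
-- def win32_escape (argument, force = False):
-- 	if force == False and argument:
-- 		clear = True
-- 		for n in ' \n\r\t\v\"':
-- 			if n in argument:
-- 				clear = False
-- 				break
-- 		if clear:
-- 			return argument
-- 	output = '"'
-- 	size = len(argument)
-- 	i = 0
-- 	while True:
-- 		blackslashes = 0
-- 		while (i < size and argument[i] == '\\'):
-- 			i += 1
-- 			blackslashes += 1
-- 		if i == size:
-- 			output += '\\' * (blackslashes * 2)
-- 			break
-- 		if argument[i] == '"':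
-- 			output += '\\' * (blackslashes * 2 + 1)
-- 			output += '"'
-- 		else:
-- 			output += '\\' * blackslashes
-- 			output += argument[i]
-- 		i += 1
-- 	output += '"'
-- 	return output
-- ===== SOURCE B (Python) =====
-- def win32_escape(argument, force=False):
--     if not force and argument and not any(c in ' \n\r\t\v"' for c in argument):
--         return argument
--     # Staged split/join: cut the argument at every '"'; inside each piece only the
--     # trailing backslash run needs doubling (it precedes a '"' or the closing quote);
--     # re-join the pieces with '\\"'.
--     def dbl(piece):
--         return piece + '\\' * (len(piece) - len(piece.rstrip('\\')))
--     return '"' + '\\"'.join(dbl(p) for p in argument.split('"')) + '"'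
-- ===== Notes on version B (the rewrite author's own statement) =====
-- stated objective: simpler
-- what changed: Replaces A's character-by-character scan with nested backslash-run while-loops by a staged split/join: cut the argument at every double-quote character, double only the trailing backslash run of each piece (an rstrip length difference), and re-join the pieces with a backslash-quote separator.
import Mathlib
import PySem

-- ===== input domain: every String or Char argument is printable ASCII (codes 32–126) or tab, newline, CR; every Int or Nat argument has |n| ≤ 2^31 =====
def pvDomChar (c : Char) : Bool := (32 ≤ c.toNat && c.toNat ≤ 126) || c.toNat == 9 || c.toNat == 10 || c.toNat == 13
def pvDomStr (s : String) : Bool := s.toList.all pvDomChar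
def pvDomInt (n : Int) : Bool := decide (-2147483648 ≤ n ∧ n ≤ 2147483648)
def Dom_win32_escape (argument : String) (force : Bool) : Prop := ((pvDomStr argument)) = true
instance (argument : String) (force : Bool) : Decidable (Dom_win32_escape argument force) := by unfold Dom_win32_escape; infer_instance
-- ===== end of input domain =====

-- B replaces A's character-by-character scan (nested backslash-run while-loops) by a
-- staged split/join: cut the argument at every double-quote, double only the trailing
-- backslash run of each piece, re-join with backslash-quote; objective: simpler.

-- ===== PORT A =====
-- the special characters scanned by A's early-return check, in A's order ('\v' is '\x0b')
def pvSpecials : List Char := [' ', '\n', '\r', '\t', '\x0b', '"']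

-- A's inner while loop: count of leading backslashes from position i (the rest of the string)
def pvCountBS : List Char → Nat
  | '\\' :: tl => pvCountBS tl + 1
  | _ => 0

-- A's outer 'while True' loop; 'rest' is argument[i:], 'output' the accumulated string
def win32EscapeLoop (rest output : List Char) : List Char :=
  let bs := pvCountBS rest
  match h : rest.drop bs with
  | [] => output ++ List.replicate (bs * 2) '\\'
  | c :: tl =>
    if c = '"' then
      win32EscapeLoop tl (output ++ List.replicate (bs * 2 + 1) '\\' ++ ['"'])
    else
      win32EscapeLoop tl (output ++ List.replicate bs '\\' ++ [c])
termination_by rest.length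
decreasing_by
  all_goals
    have hlen := congrArg List.length h
    simp [List.length_drop] at hlen
    omega

def win32_escape (argument : String) (force : Bool) : String :=
  if force = false ∧ argument ≠ "" ∧
      (pvSpecials.all fun n => !(argument.toList.contains n)) then
    argument
  else
    String.mk ('"' :: win32EscapeLoop argument.toList [] ++ ['"'])

-- ===== PORT B =====
-- len(piece) - len(piece.rstrip('\\')): the length of the trailing backslash run
-- (hand port of the rstrip('\\') length difference; exact: rstrip removes exactly
-- the trailing run of the given character)
def pvTrail (s : List Char) : Nat := (s.reverse.takeWhile (· = '\\')).length

-- Source B's dbl helper: double the trailing backslash run of a piece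
def pvDbl (s : List Char) : List Char := s ++ List.replicate (pvTrail s) '\\'

-- hand port of argument.split('"') (one-char separator, no limit; exact: pieces
-- between occurrences of '"', empty pieces kept, never returns an empty list)
def pvSplitQ : List Char → List (List Char)
  | [] => [[]]
  | c :: tl =>
    if c = '"' then [] :: pvSplitQ tl
    else
      match pvSplitQ tl with
      | p :: ps => (c :: p) :: ps
      | [] => [[c]]  -- unreachable: pvSplitQ never returns []

def win32_escape_alt (argument : String) (force : Bool) : String :=
  if force = false ∧ argument ≠ "" ∧
      !(argument.toList.any fun c => pvSpecials.contains c) then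
    argument
  else
    -- '\\"'.join(dbl(p) for p in argument.split('"')) ported via List.intercalate
    String.mk ('"' :: List.intercalate ['\\', '"'] ((pvSplitQ argument.toList).map pvDbl)
      ++ ['"'])

-- ===== PRECONDITION & SPEC =====
def Spec_win32_escape (argument : String) (force : Bool) (out : String) : Prop := out = win32_escape_alt argument force
instance (argument : String) (force : Bool) (out : String) : Decidable (Spec_win32_escape argument force out) := by unfold Spec_win32_escape; infer_instance

-- ===== CLAIM (what is proved, stated in full; the proofs are below) =====
def Claim_equal_win32_escape : Prop := ∀ (argument : String) (force : Bool), Dom_win32_escape argument force → Spec_win32_escape argument force (win32_escape argument force)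

-- ===== LEMMAS AND PROOFS =====

-- the two early-return scans decide the same condition
lemma clear_check_eq (l : List Char) :
    (pvSpecials.all fun n => !(l.contains n)) = !(l.any fun c => pvSpecials.contains c) := by
  rw [Bool.eq_iff_iff]
  simp [List.all_eq_true]
  tauto

lemma countBS_replicate (k : Nat) : pvCountBS (List.replicate k '\\') = k := by
  induction k with
  | zero => simp [pvCountBS]
  | succ n ih => simpa [pvCountBS, List.replicate_succ] using ih

lemma countBS_replicate_cons (k : Nat) (c : Char) (tl : List Char) (hc : c ≠ '\\') :
    pvCountBS (List.replicate k '\\' ++ c :: tl) = k := by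
  induction k with
  | zero =>
    simp only [List.replicate_zero, List.nil_append]
    cases c
    simp_all [pvCountBS, Char.ext_iff]
  | succ n ih => simpa [pvCountBS, List.replicate_succ] using ih

-- one unfolding of A's outer loop on a run of k backslashes ending the string
lemma loopA_nil_rep (k : Nat) (out : List Char) :
    win32EscapeLoop (List.replicate k '\\') out = out ++ List.replicate (k * 2) '\\' := by
  rw [win32EscapeLoop]
  split
  · rw [countBS_replicate]
  · rename_i c tl h
    rw [countBS_replicate, List.drop_replicate] at h
    simp at h

-- one unfolding of A's outer loop on a run of k backslashes followed by c (≠ '\\')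
lemma loopA_step (k : Nat) (c : Char) (tl out : List Char) (hc : c ≠ '\\') :
    win32EscapeLoop (List.replicate k '\\' ++ c :: tl) out =
      if c = '"' then win32EscapeLoop tl (out ++ List.replicate (k * 2 + 1) '\\' ++ ['"'])
      else win32EscapeLoop tl (out ++ List.replicate k '\\' ++ [c]) := by
  have hdrop : (List.replicate k '\\' ++ c :: tl).drop k = c :: tl :=
    List.drop_left' (by simp)
  rw [win32EscapeLoop]
  split
  · rename_i h
    rw [countBS_replicate_cons k c tl hc, hdrop] at h
    cases h
  · rename_i c' tl' h
    rw [countBS_replicate_cons k c tl hc, hdrop] at h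
    injection h with h1 h2
    subst h1; subst h2
    rw [countBS_replicate_cons k c tl hc]

-- every list of characters splits into a leading backslash run and a rest
lemma bs_decomp (l : List Char) :
    ∃ k r, l = List.replicate k '\\' ++ r ∧ (r = [] ∨ ∃ c tl, r = c :: tl ∧ c ≠ '\\') := by
  induction l with
  | nil => exact ⟨0, [], by simp, Or.inl rfl⟩
  | cons c tl ih =>
    by_cases hc : c = '\\'
    · obtain ⟨k, r, hl, hr⟩ := ih
      subst hc
      exact ⟨k + 1, r, by simp [List.replicate_succ, hl], hr⟩
    · exact ⟨0, c :: tl, by simp, Or.inr ⟨c, tl, rfl, hc⟩⟩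

-- accumulator lemma for A's outer loop
lemma loopA_acc (n : Nat) (rest : List Char) (hn : rest.length ≤ n) (out : List Char) :
    win32EscapeLoop rest out = out ++ win32EscapeLoop rest [] := by
  induction n generalizing rest out with
  | zero =>
    have : rest = [] := by cases rest <;> simp_all
    subst this
    have h1 := loopA_nil_rep 0 out
    have h2 := loopA_nil_rep 0 ([] : List Char)
    simp at h1 h2
    rw [h1, h2]
    simp
  | succ n ih =>
    obtain ⟨k, r, hl, hr⟩ := bs_decomp rest
    subst hl
    rcases hr with hr | ⟨c, tl, hr, hc⟩
    · subst hr
      simp [loopA_nil_rep]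
    · subst hr
      have hlen : tl.length ≤ n := by
        have := hn
        simp [List.length_append] at this
        omega
      rw [loopA_step k c tl out hc, loopA_step k c tl [] hc]
      split_ifs with hq
      · rw [ih tl hlen]
        conv_rhs => rw [ih tl hlen]
        simp
      · rw [ih tl hlen]
        conv_rhs => rw [ih tl hlen]
        simp

-- takeWhile length is indifferent to what follows a failing element
lemma takeWhile_len_mid (p : Char → Bool) (c : Char) (hc : p c = false) :
    ∀ (x y : List Char),
      (List.takeWhile p (x ++ c :: y)).length = (List.takeWhile p x).length := by
  intro x y
  induction x with
  | nil => simp [hc]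
  | cons a x ih =>
    by_cases ha : p a = true
    · simp [ha, ih]
    · simp [ha]

-- the trailing backslash run of l ++ c :: tl (c not a backslash) is tl's
lemma trail_mid (l : List Char) (c : Char) (tl : List Char) (hc : c ≠ '\\') :
    pvTrail (l ++ c :: tl) = pvTrail tl := by
  unfold pvTrail
  rw [List.reverse_append, List.reverse_cons, List.append_assoc, List.singleton_append]
  exact takeWhile_len_mid _ c (by simp [hc]) tl.reverse l.reverse

lemma trail_replicate (k : Nat) : pvTrail (List.replicate k '\\') = k := by
  unfold pvTrail
  simp

lemma dbl_replicate (k : Nat) :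
    pvDbl (List.replicate k '\\') = List.replicate (k * 2) '\\' := by
  unfold pvDbl
  rw [trail_replicate, ← List.replicate_add]
  congr 1
  omega

lemma dbl_run_cons (k : Nat) (c : Char) (tl : List Char) (hc : c ≠ '\\') :
    pvDbl (List.replicate k '\\' ++ c :: tl) = List.replicate k '\\' ++ c :: pvDbl tl := by
  unfold pvDbl
  rw [trail_mid _ c tl hc]
  simp

lemma splitQ_ne_nil (l : List Char) : pvSplitQ l ≠ [] := by
  induction l with
  | nil => simp [pvSplitQ]
  | cons c tl ih =>
    unfold pvSplitQ
    split_ifs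
    · simp
    · cases h : pvSplitQ tl with
      | nil => exact absurd h ih
      | cons p ps => simp

lemma splitQ_no_quote (l : List Char) (h : '"' ∉ l) : pvSplitQ l = [l] := by
  induction l with
  | nil => rfl
  | cons c tl ih =>
    have hc : c ≠ '"' := by intro hh; exact h (hh ▸ List.mem_cons_self)
    have htl : '"' ∉ tl := fun hh => h (List.mem_cons_of_mem _ hh)
    unfold pvSplitQ
    rw [if_neg hc, ih htl]

lemma splitQ_cons (c : Char) (l p : List Char) (ps : List (List Char)) (hc : c ≠ '"')
    (h : pvSplitQ l = p :: ps) : pvSplitQ (c :: l) = (c :: p) :: ps := by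
  conv_lhs => rw [pvSplitQ]
  rw [if_neg hc, h]

lemma splitQ_quote (pre rest : List Char) (h : '"' ∉ pre) :
    pvSplitQ (pre ++ '"' :: rest) = pre :: pvSplitQ rest := by
  induction pre with
  | nil => simp [pvSplitQ]
  | cons c tl ih =>
    have hc : c ≠ '"' := by intro hh; exact h (hh ▸ List.mem_cons_self)
    have htl : '"' ∉ tl := fun hh => h (List.mem_cons_of_mem _ hh)
    rw [List.cons_append]
    exact splitQ_cons c _ tl (pvSplitQ rest) hc (ih htl)

-- every list either has no quote or splits at its first quote
lemma quote_decomp (l : List Char) :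
    '"' ∉ l ∨ ∃ pre rest, l = pre ++ '"' :: rest ∧ '"' ∉ pre := by
  induction l with
  | nil => exact Or.inl (by simp)
  | cons c tl ih =>
    by_cases hc : c = '"'
    · exact Or.inr ⟨[], tl, by simp [hc], by simp⟩
    · rcases ih with h | ⟨pre, rest, hl, hpre⟩
      · refine Or.inl ?_
        simp [h]
        exact fun hh => hc hh.symm
      · refine Or.inr ⟨c :: pre, rest, by simp [hl], ?_⟩
        simp [hpre]
        exact fun hh => hc hh.symm

-- A's loop on a quote-free string is B's trailing-run doubling
lemma loopA_no_quote (n : Nat) (l : List Char) (hn : l.length ≤ n) (h : '"' ∉ l) :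
    win32EscapeLoop l [] = pvDbl l := by
  induction n generalizing l with
  | zero =>
    have : l = [] := by cases l <;> simp_all
    subst this
    simpa using loopA_nil_rep 0 []
  | succ n ih =>
    obtain ⟨k, r, hl, hr⟩ := bs_decomp l
    subst hl
    rcases hr with hr | ⟨c, tl, hr, hc⟩
    · subst hr
      simpa [dbl_replicate] using loopA_nil_rep k []
    · subst hr
      have hq : c ≠ '"' := by intro hh; exact h (by simp [hh])
      have htl : '"' ∉ tl := fun hh => h (by simp [hh])
      have hlen : tl.length ≤ n := by simp [List.length_append] at hn; omega
      rw [loopA_step k c tl [] hc, if_neg hq,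
        loopA_acc tl.length tl le_rfl, ih tl hlen htl, dbl_run_cons k c tl hc]
      simp

-- A's loop consumes a quote-free prefix up to a quote the way B renders a piece
lemma loopA_quote (n : Nat) (pre : List Char) (hn : pre.length ≤ n) (h : '"' ∉ pre)
    (rest : List Char) :
    win32EscapeLoop (pre ++ '"' :: rest) [] =
      pvDbl pre ++ '\\' :: '"' :: win32EscapeLoop rest [] := by
  induction n generalizing pre with
  | zero =>
    have : pre = [] := by cases pre <;> simp_all
    subst this
    rw [List.nil_append]
    have := loopA_step 0 '"' rest [] (by decide)
    simp at this
    rw [this, loopA_acc rest.length rest le_rfl]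
    simp [pvDbl, pvTrail]
  | succ n ih =>
    obtain ⟨k, r, hl, hr⟩ := bs_decomp pre
    subst hl
    rcases hr with hr | ⟨c, tl, hr, hc⟩
    · subst hr
      simp only [List.append_nil]
      rw [loopA_step k '"' rest [] (by decide), if_pos rfl,
        loopA_acc rest.length rest le_rfl, dbl_replicate]
      have : List.replicate (k * 2 + 1) '\\' = List.replicate (k * 2) '\\' ++ ['\\'] := by
        simp [List.replicate_succ']
      rw [this]
      simp
    · subst hr
      have hq : c ≠ '"' := by intro hh; exact h (by simp [hh])
      have htl : '"' ∉ tl := fun hh => h (by simp [hh])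
      have hlen : tl.length ≤ n := by simp [List.length_append] at hn; omega
      rw [List.append_assoc, List.cons_append,
        loopA_step k c (tl ++ '"' :: rest) [] hc, if_neg hq,
        loopA_acc (tl ++ '"' :: rest).length _ le_rfl, ih tl hlen htl,
        dbl_run_cons k c tl hc]
      simp

lemma intercalate_two (sep a p : List Char) (ps : List (List Char)) :
    List.intercalate sep (a :: p :: ps) = a ++ sep ++ List.intercalate sep (p :: ps) := by
  simp [List.intercalate, List.intersperse]

-- the bodies agree: A's loop is B's split / double / re-join
lemma loopA_eq_body (n : Nat) (l : List Char) (hn : l.length ≤ n) :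
    win32EscapeLoop l [] = List.intercalate ['\\', '"'] ((pvSplitQ l).map pvDbl) := by
  induction n generalizing l with
  | zero =>
    have : l = [] := by cases l <;> simp_all
    subst this
    have := loopA_nil_rep 0 []
    simp at this
    simp [this, pvSplitQ, pvDbl, pvTrail, List.intercalate]
  | succ n ih =>
    rcases quote_decomp l with h | ⟨pre, rest, hl, hpre⟩
    · rw [loopA_no_quote l.length l le_rfl h, splitQ_no_quote l h]
      simp [List.intercalate]
    · subst hl
      have hlen : rest.length ≤ n := by simp [List.length_append] at hn; omega
      rw [loopA_quote pre.length pre le_rfl hpre rest, ih rest hlen,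
        splitQ_quote pre rest hpre, List.map_cons]
      cases hm : (pvSplitQ rest).map pvDbl with
      | nil => exact absurd (List.map_eq_nil_iff.mp hm) (splitQ_ne_nil rest)
      | cons p ps =>
        rw [intercalate_two]
        simp

-- ===== VERDICT (by name: the statement is the Claim_ definition above) =====
theorem win32_escape_spec : Claim_equal_win32_escape := by
  intro argument force _
  unfold Spec_win32_escape win32_escape win32_escape_alt
  rw [clear_check_eq]
  split
  · rfl
  · rw [loopA_eq_body argument.toList.length argument.toList le_rfl]
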